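-- pv_equiv track=rewrite | github.com/rayashi/algorithms | same_occur/same_occur.py | same_occur
-- ===== SOURCE A (Python) =====
-- def same_occur(string):
--     chars_count = dict()
--
--     for i in range(len(string)):
--         chars_count[string[i]] = (chars_count.get(string[i]) or 0) + 1
--
--     first_count = chars_count[string[0]]
--     used = False
--
--     for key in chars_count:
--         if first_count != chars_count[key]:
--             if used:
--                 return "NO"
--             else:
--                 if (first_count + 1) == chars_count[key] or (first_count - 1) == chars_count[key] or chars_count[key] == 1 or first_count == 1:
--                     used = True
--                 else:
--                     return "NO"
--
--     return "YES"
-- ===== SOURCE B (Python) =====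
-- def same_occur(string):
--     first = string[0]
--     first_count = sum(1 for ch in string if ch == first)
--     runs = []
--     s = sorted(string)
--     i, n = 0, len(s)
--     while i < n:
--         j = i
--         while j < n and s[j] == s[i]:
--             j += 1
--         runs.append(j - i)
--         i = j
--     deviants = [r for r in runs if r != first_count]
--     if not deviants:
--         return "YES"
--     if len(deviants) >= 2:
--         return "NO"
--     c = deviants[0]
--     if c == first_count + 1 or c == first_count - 1 or c == 1 or first_count == 1:
--         return "YES"
--     return "NO"
-- ===== Notes on version B (the rewrite author's own statement) =====
-- stated objective: alternative
-- what changed: B drops the hash-map counting and the used-flag loop entirely: it sorts the string, extracts run lengths of equal characters with a two-index scan (the multiset of per-character counts), counts the first character by a direct pass, and decides from the list of run lengths deviating from that count.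
import Mathlib
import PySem

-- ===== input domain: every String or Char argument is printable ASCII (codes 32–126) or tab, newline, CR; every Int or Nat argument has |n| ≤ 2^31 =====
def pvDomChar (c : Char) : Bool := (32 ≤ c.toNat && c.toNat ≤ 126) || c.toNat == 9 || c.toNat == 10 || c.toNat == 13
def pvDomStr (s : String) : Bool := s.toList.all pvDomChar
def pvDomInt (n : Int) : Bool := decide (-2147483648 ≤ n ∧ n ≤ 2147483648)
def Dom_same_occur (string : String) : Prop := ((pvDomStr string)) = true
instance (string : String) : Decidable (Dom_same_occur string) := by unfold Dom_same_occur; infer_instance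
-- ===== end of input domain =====

-- B replaces A's hash-map counting and used-flag dict loop by sort + run-length extraction
-- (the run lengths of the sorted string are the per-character counts) and a direct count of the
-- first character: a genuinely different algorithm of similar size and cost (objective: alternative).

-- ===== PORT A =====
-- for i in range(len(string)): chars_count[string[i]] = (chars_count.get(string[i]) or 0) + 1
-- '(get(ch) or 0)' ported as getD ch 0: exact, since every stored count is a positive int
-- (truthy) and a missing key gives None, i.e. 0
def countLoopA (cs : List Char) : PySem.Dict Char Int :=
  (PySem.List.pyRange 0 (PySem.List.len cs) 1).foldl
    (fun d i => d.insert (PySem.List.pyGetD cs i ' ') (d.getD (PySem.List.pyGetD cs i ' ') 0 + 1))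
    PySem.Dict.empty

-- the 'for key in chars_count' loop with its used flag and early returns
def sameLoopA (keys : List Char) (d : PySem.Dict Char Int) (first_count : Int) (used : Bool) : String :=
  match keys with
  | [] => "YES"
  | key :: rest =>
    -- chars_count[key]: key ∈ chars_count, so the lookup never raises; getD 0 is exact here
    if first_count ≠ d.getD key 0 then
      if used then "NO"
      else if first_count + 1 = d.getD key 0 ∨ first_count - 1 = d.getD key 0 ∨
              d.getD key 0 = 1 ∨ first_count = 1 then
        sameLoopA rest d first_count true
      else "NO"
    else sameLoopA rest d first_count used

def same_occur (string : String) : String :=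
  -- first_count = chars_count[string[0]]: string[0] raises IndexError on "" (excluded by Pre_),
  -- then the key string[0] is always present; both 'none' arms are unreachable under Pre_
  match PySem.Str.pyGet? string 0 with
  | none => ""
  | some c0 =>
    match (countLoopA string.toList).get? c0 with
    | none => ""
    | some first_count =>
      sameLoopA (countLoopA string.toList).keys (countLoopA string.toList) first_count false

-- ===== PORT B =====
-- the 'while i < n: j = i; while j < n and s[j] == s[i]: j += 1; runs.append(j - i); i = j'
-- scan over the sorted list: the inner while is the takeWhile, advancing i to j is the dropWhile
def runLengths : List Char → List Int
  | [] => []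
  | c :: rest =>
    ((rest.takeWhile (fun x => x == c)).length + 1 : Int) ::
      runLengths (rest.dropWhile (fun x => x == c))
  termination_by l => l.length
  decreasing_by
    exact Nat.lt_succ_of_le (List.length_dropWhile_le _ _)

def same_occur_alt (string : String) : String :=
  -- string[0] raises IndexError on "" (excluded by Pre_); the 'none' arm is unreachable under Pre_
  match PySem.Str.pyGet? string 0 with
  | none => ""
  | some first =>
    let cs := string.toList
    -- first_count = sum(1 for ch in string if ch == first)
    let first_count : Int := cs.foldl (fun acc ch => if ch == first then acc + 1 else acc) 0
    let runs := runLengths (PySem.List.sorted cs (fun x => x) false)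
    let deviants := runs.filter (fun r => r ≠ first_count)
    if deviants.isEmpty then "YES"
    else if 2 ≤ deviants.length then "NO"
    else if deviants.headD 0 = first_count + 1 ∨ deviants.headD 0 = first_count - 1 ∨
            deviants.headD 0 = 1 ∨ first_count = 1 then "YES"
    else "NO"

-- ===== PRECONDITION & SPEC =====
-- Pre_ excludes only the empty string, on which A (and B) raise IndexError at string[0]
def Pre_same_occur (string : String) : Prop := string ≠ ""
instance (string : String) : Decidable (Pre_same_occur string) := by unfold Pre_same_occur; infer_instance
def pvWitness_same_occur : String := "aab"

def Spec_same_occur (string : String) (out : String) : Prop := out = same_occur_alt string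
instance (string : String) (out : String) : Decidable (Spec_same_occur string out) := by unfold Spec_same_occur; infer_instance

-- ===== CLAIM (what is proved, stated in full; the proofs are below) =====
def Claim_equal_same_occur : Prop := ∀ (string : String), Dom_same_occur string → Pre_same_occur string → Spec_same_occur string (same_occur string)

-- ===== LEMMAS AND PROOFS =====

-- A's counting loop is Counter(string)
lemma countLoopA_eq_counter (cs : List Char) : countLoopA cs = PySem.Dict.counter cs := by
  unfold countLoopA
  have := PySem.List.foldl_pyRange_pyGetD (xs := cs) (a := 0)
    (f := fun (d : PySem.Dict Char Int) ch => d.insert ch (d.getD ch 0 + 1))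
    (d := ' ') (init := PySem.Dict.empty) (by omega)
  rw [show (PySem.List.len cs) = (0 : Int) + PySem.List.len cs by omega] at this ⊢
  rw [this, PySem.Dict.foldl_insert_getD_add_one_eq_counter]; simp

-- A's loop on the list of counts only (the lookups already performed)
def sameLoopV (l : List Int) (f : Int) (used : Bool) : String :=
  match l with
  | [] => "YES"
  | c :: rest =>
    if f ≠ c then
      if used then "NO"
      else if f + 1 = c ∨ f - 1 = c ∨ c = 1 ∨ f = 1 then sameLoopV rest f true
      else "NO"
    else sameLoopV rest f used

lemma sameLoopA_eq_sameLoopV (keys : List Char) (d : PySem.Dict Char Int) (f : Int) (u : Bool) :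
    sameLoopA keys d f u = sameLoopV (keys.map (fun k => d.getD k 0)) f u := by
  induction keys generalizing u with
  | nil => rfl
  | cons k rest ih => simp only [sameLoopA, sameLoopV, List.map_cons]; split_ifs <;> simp [ih]

-- B's decision on a list of counts (the shared value both loops reduce to)
def decideV (l : List Int) (f : Int) : String :=
  let deviants := l.filter (fun c => c ≠ f)
  if deviants.isEmpty then "YES"
  else if 2 ≤ deviants.length then "NO"
  else if deviants.headD 0 = f + 1 ∨ deviants.headD 0 = f - 1 ∨ deviants.headD 0 = 1 ∨ f = 1 then "YES"
  else "NO"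

lemma sameLoopV_eq_decideV (l : List Int) (f : Int) (u : Bool) :
    sameLoopV l f u =
      if u then (if (l.filter (fun c => c ≠ f)).isEmpty then "YES" else "NO")
      else decideV l f := by
  induction l generalizing u with
  | nil => cases u <;> simp [sameLoopV, decideV]
  | cons c rest ih =>
    by_cases hc : f = c
    · have hf : (c :: rest).filter (fun x => decide (x ≠ f)) = rest.filter (fun x => decide (x ≠ f)) := by
        simp [← hc]
      rw [sameLoopV, if_neg (not_not_intro hc), ih]
      cases u
      · simp only [Bool.false_eq_true, if_false, decideV, hf]
      · simp only [if_true, hf]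
    · have hne : c ≠ f := fun h => hc h.symm
      have hf : (c :: rest).filter (fun x => decide (x ≠ f)) = c :: rest.filter (fun x => decide (x ≠ f)) := by
        simp [hne]
      have hcond2 : (c = f + 1 ∨ c = f - 1 ∨ c = 1 ∨ f = 1) ↔ (f + 1 = c ∨ f - 1 = c ∨ c = 1 ∨ f = 1) := by
        constructor <;> (rintro (h | h | h | h) <;> simp [h])
      cases u with
      | true =>
        simp only [sameLoopV]
        simp
        rw [if_neg hc, if_neg (fun h => hne h.1)]
      | false =>
        rw [sameLoopV, if_pos hc]
        simp only [Bool.false_eq_true, if_false]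
        cases hr : rest.filter (fun x => decide (x ≠ f)) with
        | nil =>
          simp only [decideV, hf, hr]
          by_cases hcond : f + 1 = c ∨ f - 1 = c ∨ c = 1 ∨ f = 1
          · rw [if_pos hcond, ih, if_pos rfl, if_pos (by rw [hr]; rfl)]
            simp only [List.isEmpty_cons, Bool.false_eq_true, if_false, List.length_cons,
              List.length_nil, List.headD_cons]
            rw [if_neg (by omega), if_pos (hcond2.mpr hcond)]
          · rw [if_neg hcond]
            simp only [List.isEmpty_cons, Bool.false_eq_true, if_false, List.length_cons,
              List.length_nil, List.headD_cons]
            rw [if_neg (by omega), if_neg (fun h => hcond (hcond2.mp h))]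
        | cons a tl =>
          simp only [decideV, hf, hr]
          by_cases hcond : f + 1 = c ∨ f - 1 = c ∨ c = 1 ∨ f = 1
          · rw [if_pos hcond, ih, if_pos rfl, if_neg (by rw [hr]; simp)]
            simp only [List.isEmpty_cons, Bool.false_eq_true, if_false]
            rw [if_pos (by simp)]
          · rw [if_neg hcond]
            simp only [List.isEmpty_cons, Bool.false_eq_true, if_false]
            rw [if_pos (by simp)]

-- decideV only depends on the multiset of counts
lemma decideV_perm {l1 l2 : List Int} (h : l1.Perm l2) (f : Int) : decideV l1 f = decideV l2 f := by
  unfold decideV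
  have hp : (l1.filter (fun c => decide (c ≠ f))).Perm (l2.filter (fun c => decide (c ≠ f))) :=
    h.filter _
  rcases hl : l1.filter (fun c => decide (c ≠ f)) with _ | ⟨a, _ | ⟨b, tl⟩⟩
  · rw [hl] at hp
    have h2 : l2.filter (fun c => decide (c ≠ f)) = [] := (List.perm_nil.mp hp.symm)
    rw [h2]
  · rw [hl] at hp
    have h2 : l2.filter (fun c => decide (c ≠ f)) = [a] := List.perm_singleton.mp hp.symm
    rw [h2]
  · rw [hl] at hp
    have h2 : 2 ≤ (l2.filter (fun c => decide (c ≠ f))).length := by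
      rw [← hp.length_eq]; simp
    have h1 : ¬ (l2.filter (fun c => decide (c ≠ f))).isEmpty = true := by
      rcases hx : l2.filter (fun c => decide (c ≠ f)) with _ | _
      · rw [hx] at h2; simp at h2
      · simp
    simp only [List.isEmpty_cons, Bool.false_eq_true, if_false, List.length_cons]
    rw [if_pos (show 2 ≤ tl.length + 1 + 1 by omega), if_neg h1, if_pos h2]

-- in a sorted list, no copy of the head survives the dropWhile
lemma not_mem_dropWhile_sorted (c : Char) (rest : List Char)
    (h : (c :: rest).Pairwise (· ≤ ·)) : c ∉ rest.dropWhile (fun x => x == c) := by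
  intro hmem
  cases hd : rest.dropWhile (fun x => x == c) with
  | nil => rw [hd] at hmem; simp at hmem
  | cons h' d' =>
    have hwne : rest.dropWhile (fun x => x == c) ≠ [] := by rw [hd]; simp
    have hne : (fun x => x == c) ((rest.dropWhile (fun x => x == c)).head hwne) = false :=
      List.head_dropWhile_not _ hwne
    have hh'c : h' ≠ c := by
      simp only [hd, List.head_cons] at hne; simpa using hne
    have hsub : (rest.dropWhile (fun x => x == c)).Sublist rest := List.dropWhile_sublist _
    have h'mem : h' ∈ rest := hsub.subset (by rw [hd]; exact List.mem_cons_self ..)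
    have hcle : c ≤ h' := (List.pairwise_cons.mp h).1 h' h'mem
    rw [hd] at hmem
    rcases List.mem_cons.mp hmem with rfl | hmem'
    · exact hh'c rfl
    · have hpd : (h' :: d').Pairwise (· ≤ ·) := hd ▸ ((List.pairwise_cons.mp h).2.sublist hsub)
      have : h' ≤ c := (List.pairwise_cons.mp hpd).1 c hmem'
      exact hh'c (le_antisymm this hcle)

-- run lengths of a sorted list are the per-element counts (as a multiset)
lemma runLengths_sorted (l : List Char) (h : l.Pairwise (· ≤ ·)) :
    (runLengths l).Perm ((PySem.List.dedup l).map (fun k => (l.count k : Int))) := by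
  induction l using runLengths.induct with
  | case1 => simp [runLengths]
  | case2 c rest ih =>
    have hrest : rest.Pairwise (· ≤ ·) := (List.pairwise_cons.mp h).2
    have hd : (rest.dropWhile (fun x => x == c)).Pairwise (· ≤ ·) :=
      hrest.sublist (List.dropWhile_sublist _)
    have hcnot : c ∉ rest.dropWhile (fun x => x == c) := not_mem_dropWhile_sorted c rest h
    have htake : ∀ x ∈ rest.takeWhile (fun x => x == c), x = c := by
      intro x hx; simpa using List.mem_takeWhile_imp hx
    have hsplit : rest.takeWhile (fun x => x == c) ++ rest.dropWhile (fun x => x == c) = rest :=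
      List.takeWhile_append_dropWhile
    have esplit : ∀ k : Char, rest.count k =
        (rest.takeWhile (fun x => x == c)).count k + (rest.dropWhile (fun x => x == c)).count k := by
      intro k
      have := List.count_append (a := k) (l₁ := rest.takeWhile (fun x => x == c))
        (l₂ := rest.dropWhile (fun x => x == c))
      rw [hsplit] at this; exact this
    -- count of c in the whole list is 1 + the takeWhile length
    have hcount_c : (c :: rest).count c = (rest.takeWhile (fun x => x == c)).length + 1 := by
      have e1 : (c :: rest).count c = rest.count c + 1 := List.count_cons_self
      have e2 : (rest.takeWhile (fun x => x == c)).count c = (rest.takeWhile (fun x => x == c)).length :=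
        List.count_eq_length.mpr (fun x hx => by simp [htake x hx])
      have e3 : (rest.dropWhile (fun x => x == c)).count c = 0 := List.count_eq_zero.mpr hcnot
      have := esplit c
      omega
    -- counts of other keys are unchanged by dropping the leading run
    have hcount_k : ∀ k ∈ PySem.List.dedup (rest.dropWhile (fun x => x == c)),
        ((rest.dropWhile (fun x => x == c)).count k : Int) = ((c :: rest).count k : Int) := by
      intro k hk
      have hkmem : k ∈ rest.dropWhile (fun x => x == c) := (PySem.List.mem_dedup _ _).mp hk
      have hkc : k ≠ c := fun hkc => hcnot (hkc ▸ hkmem)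
      have e1 : (c :: rest).count k = rest.count k := by
        simp [Ne.symm hkc]
      have e3 : (rest.takeWhile (fun x => x == c)).count k = 0 :=
        List.count_eq_zero.mpr (fun hkm => hkc (htake k hkm))
      have := esplit k
      omega
    -- the dedup of the whole list is a permutation of c :: dedup (dropWhile)
    have hperm_dedup : (PySem.List.dedup (c :: rest)).Perm
        (c :: PySem.List.dedup (rest.dropWhile (fun x => x == c))) := by
      rw [List.perm_ext_iff_of_nodup (PySem.List.nodup_dedup _)
        (List.nodup_cons.mpr ⟨fun hc => hcnot ((PySem.List.mem_dedup _ _).mp hc), PySem.List.nodup_dedup _⟩)]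
      intro x
      rw [PySem.List.mem_dedup, List.mem_cons, List.mem_cons, PySem.List.mem_dedup]
      constructor
      · rintro (rfl | hx)
        · exact Or.inl rfl
        · rw [← hsplit] at hx
          rcases List.mem_append.mp hx with hx | hx
          · exact Or.inl (htake x hx)
          · exact Or.inr hx
      · rintro (rfl | hx)
        · exact Or.inl rfl
        · exact Or.inr (by rw [← hsplit]; exact List.mem_append.mpr (Or.inr hx))
    rw [runLengths]
    refine List.Perm.trans ?_ ((hperm_dedup.map _).symm)
    rw [List.map_cons]
    have hhead : ((rest.takeWhile (fun x => x == c)).length + 1 : Int) = ((c :: rest).count c : Int) := by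
      rw [hcount_c]; push_cast; ring
    rw [hhead]
    exact List.Perm.cons _ ((ih hd).trans (List.Perm.of_eq (List.map_congr_left hcount_k)))

-- ===== VERDICT (by name: the statement is the Claim_ definition above) =====
theorem same_occur_spec : Claim_equal_same_occur := by
  intro s _ _
  unfold Spec_same_occur same_occur same_occur_alt
  cases h0 : PySem.Str.pyGet? s 0 with
  | none => rfl
  | some c0 =>
    have hc0 : c0 ∈ s.toList := by
      have h1 : s.toList[(0 : Nat)]? = some c0 := by
        rw [← PySem.List.pyGet?_natCast]; simpa using h0
      exact List.mem_of_getElem? h1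
    have hget : (PySem.Dict.counter s.toList).get? c0 = some ((s.toList.count c0 : Int)) := by
      rw [PySem.Dict.get?_eq_some_iff_mem_items _ _ _ (PySem.Dict.nodup_keys_counter _)]
      rw [PySem.Dict.items_counter]
      exact List.mem_map.mpr ⟨c0, (PySem.Set.mem_ofList _ _).mpr hc0, rfl⟩
    rw [countLoopA_eq_counter]
    simp only [hget]
    rw [sameLoopA_eq_sameLoopV, sameLoopV_eq_decideV]
    simp only [Bool.false_eq_true, if_false]
    have hA : (PySem.Dict.counter s.toList).keys.map (fun k => (PySem.Dict.counter s.toList).getD k 0)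
        = (PySem.List.dedup s.toList).map (fun k => (s.toList.count k : Int)) := by
      rw [PySem.Dict.keys_counter]
      simp only [PySem.List.dedup_eq_ofList]
      exact List.map_congr_left (fun k _ => PySem.Dict.getD_counter _ _)
    rw [hA]
    rw [PySem.List.foldl_beq_add_one, zero_add]
    have hsp : (PySem.List.sorted s.toList (fun x => x) false).Pairwise (· ≤ ·) := by
      have := PySem.List.sorted_pairwise (xs := s.toList) (key := fun x => x)
      simpa using this
    have hperm : (runLengths (PySem.List.sorted s.toList (fun x => x) false)).Perm
        ((PySem.List.dedup s.toList).map (fun k => (s.toList.count k : Int))) := by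
      refine (runLengths_sorted _ hsp).trans ?_
      have hmapeq : (PySem.List.dedup (PySem.List.sorted s.toList (fun x => x) false)).map
            (fun k => ((PySem.List.sorted s.toList (fun x => x) false).count k : Int))
          = (PySem.List.dedup (PySem.List.sorted s.toList (fun x => x) false)).map
            (fun k => (s.toList.count k : Int)) :=
        List.map_congr_left (fun k _ => by
          rw [(PySem.List.sorted_perm s.toList (fun x => x) false).count_eq])
      rw [hmapeq]
      refine List.Perm.map _ ?_
      rw [List.perm_ext_iff_of_nodup (PySem.List.nodup_dedup _) (PySem.List.nodup_dedup _)]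
      intro x
      rw [PySem.List.mem_dedup, PySem.List.mem_dedup, PySem.List.mem_sorted]
    exact (decideV_perm hperm (s.toList.count c0)).symm
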